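-- pv_equiv track=rewrite | github.com/GustavoYG/Compiladores | pruebas_avances/cuarto.py | _dividir_css_en_bloques
-- ===== SOURCE A (Python) =====
-- def _dividir_css_en_bloques(css_content):
--     """Divide el CSS en bloques individuales de reglas"""
--     bloques = []
--     lineas = css_content.split('\n')
--     bloque_actual = []
--     nivel_llaves = 0
--
--     for linea in lineas:
--         bloque_actual.append(linea)
--         nivel_llaves += linea.count('{') - linea.count('}')
--
--         if nivel_llaves == 0 and bloque_actual:
--             bloque_texto = '\n'.join(bloque_actual).strip()
--             if bloque_texto:
--                 bloques.append(bloque_texto)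
--             bloque_actual = []
--
--     return bloques
-- ===== SOURCE B (Python) =====
-- def _dividir_css_en_bloques(css_content):
--     """Divide el CSS en bloques individuales de reglas"""
--     lineas = css_content.split('\n')
--
--     # Pass 1: indices where the running brace total returns to zero (block ends).
--     limites = []
--     total = 0
--     for i, linea in enumerate(lineas):
--         total += linea.count('{') - linea.count('}')
--         if total == 0:
--             limites.append(i)
--
--     # Pass 2: slice the lines between consecutive boundaries into blocks.
--     bloques = []
--     prev = 0
--     for b in limites:
--         texto = '\n'.join(lineas[prev:b + 1]).strip()
--         if texto:
--             bloques.append(texto)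
--         prev = b + 1
--     return bloques
-- ===== Notes on version B (the rewrite author's own statement) =====
-- stated objective: alternative
-- what changed: Replaces A's single accumulate-and-emit loop with a buffer of lines by a precompute-then-partition decomposition: one pass records the line indices where the running brace total returns to zero, then a second pass slices the line list between consecutive boundaries and joins/strips each slice.
import Mathlib
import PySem

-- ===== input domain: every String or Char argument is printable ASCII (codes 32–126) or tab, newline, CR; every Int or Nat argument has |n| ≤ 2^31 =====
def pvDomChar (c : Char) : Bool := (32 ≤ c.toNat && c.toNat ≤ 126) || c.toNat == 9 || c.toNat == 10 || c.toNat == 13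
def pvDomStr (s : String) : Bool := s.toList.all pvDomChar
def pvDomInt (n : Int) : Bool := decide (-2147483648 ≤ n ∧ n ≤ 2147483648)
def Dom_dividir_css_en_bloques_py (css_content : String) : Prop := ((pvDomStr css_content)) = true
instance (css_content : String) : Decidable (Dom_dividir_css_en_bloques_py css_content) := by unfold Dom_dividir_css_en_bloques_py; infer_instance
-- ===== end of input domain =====

-- B replaces A's accumulate-and-emit loop (line buffer + inline flush) by a two-pass
-- decomposition: collect the zero-crossing line indices first, then slice the line list
-- between consecutive boundaries; objective: alternative (same cost, different structure).

-- ===== PORT A =====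
-- the loop body of A (append line to buffer, update brace level, flush on level 0)
def pvAStep (st : List String × List String × Int) (linea : String) :
    List String × List String × Int :=
  let bloque_actual := st.2.1 ++ [linea]
  let nivel := st.2.2 + ((PySem.Str.count linea "{" : Int) - (PySem.Str.count linea "}" : Int))
  if nivel = 0 ∧ bloque_actual ≠ [] then
    let bloque_texto := PySem.Str.strip (PySem.Str.join "\n" bloque_actual)
    (if bloque_texto ≠ "" then st.1 ++ [bloque_texto] else st.1, [], nivel)
  else
    (st.1, bloque_actual, nivel)

def dividir_css_en_bloques_py (css_content : String) : List String :=
  let lineas := (PySem.Str.split? css_content "\n").getD []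
  (lineas.foldl pvAStep ([], [], 0)).1

-- ===== PORT B =====
-- B pass 1 body: update running total, record index where it returns to zero
def pvBStep1 (st : Int × List Int) (pr : Int × String) : Int × List Int :=
  let total := st.1 + ((PySem.Str.count pr.2 "{" : Int) - (PySem.Str.count pr.2 "}" : Int))
  (total, if total = 0 then st.2 ++ [pr.1] else st.2)

-- B pass 2 body: slice the lines from the previous boundary through this one
def pvBStep2 (lineas : List String) (st : List String × Int) (b : Int) : List String × Int :=
  let texto := PySem.Str.strip (PySem.Str.join "\n"
    (PySem.List.slice lineas (some st.2) (some (b + 1))))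
  (if texto ≠ "" then st.1 ++ [texto] else st.1, b + 1)

def dividir_css_en_bloques_py_alt (css_content : String) : List String :=
  let lineas := (PySem.Str.split? css_content "\n").getD []
  let limites := ((PySem.List.enumerate lineas).foldl pvBStep1 (0, [])).2
  (limites.foldl (pvBStep2 lineas) ([], 0)).1

-- ===== PRECONDITION & SPEC =====
def Spec_dividir_css_en_bloques_py (css_content : String) (out : List String) : Prop := out = dividir_css_en_bloques_py_alt css_content
instance (css_content : String) (out : List String) : Decidable (Spec_dividir_css_en_bloques_py css_content out) := by unfold Spec_dividir_css_en_bloques_py; infer_instance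

-- ===== CLAIM (what is proved, stated in full; the proofs are below) =====
def Claim_equal_dividir_css_en_bloques_py : Prop := ∀ (css_content : String), Dom_dividir_css_en_bloques_py css_content → Spec_dividir_css_en_bloques_py css_content (dividir_css_en_bloques_py css_content)

-- ===== LEMMAS AND PROOFS =====

-- brace delta of one line
def pvDelta (l : String) : Int :=
  (PySem.Str.count l "{" : Int) - (PySem.Str.count l "}" : Int)

def pvSum (c : List String) : Int := (c.map pvDelta).sum

-- append the stripped join of `cur` to `bl` if non-empty
def pvEmit (bl cur : List String) : List String :=
  let texto := PySem.Str.strip (PySem.Str.join "\n" cur)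
  if texto ≠ "" then bl ++ [texto] else bl

-- common characterisation: blocks produced from buffer `cur` and remaining lines
def pvBlocksFrom : List String → List String → List String
  | _, [] => []
  | cur, l :: rest =>
    if pvSum (cur ++ [l]) = 0 then
      pvEmit [] (cur ++ [l]) ++ pvBlocksFrom [] rest
    else
      pvBlocksFrom (cur ++ [l]) rest

lemma pvEmit_eq_append (bl cur : List String) : pvEmit bl cur = bl ++ pvEmit [] cur := by
  by_cases h : PySem.Str.strip (PySem.Str.join "\n" cur) = "" <;> simp [pvEmit, h]

lemma pvSum_append_singleton (c : List String) (l : String) :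
    pvSum (c ++ [l]) = pvSum c + pvDelta l := by
  simp [pvSum]

-- one step of A, phrased through pvDelta/pvEmit
lemma pvAStep_eq (bl cur : List String) (n : Int) (l : String) :
    pvAStep (bl, cur, n) l =
      if n + pvDelta l = 0 then (pvEmit bl (cur ++ [l]), [], n + pvDelta l)
      else (bl, cur ++ [l], n + pvDelta l) := by
  by_cases h : n + pvDelta l = 0 <;> simp [pvAStep, pvEmit, pvDelta]

-- A's fold computes pvBlocksFrom
lemma pvA_fold (rest : List String) : ∀ (bl cur : List String),
    (rest.foldl pvAStep (bl, cur, pvSum cur)).1 = bl ++ pvBlocksFrom cur rest := by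
  induction rest with
  | nil => intro bl cur; simp [pvBlocksFrom]
  | cons l rest ih =>
    intro bl cur
    show (rest.foldl pvAStep (pvAStep (bl, cur, pvSum cur) l)).1 = _
    rw [pvAStep_eq]
    by_cases h : pvSum cur + pvDelta l = 0
    · rw [if_pos h, h]
      have hih := ih (pvEmit bl (cur ++ [l])) []
      simp only [pvSum, List.map_nil, List.sum_nil] at hih
      rw [hih, pvEmit_eq_append bl (cur ++ [l])]
      have hs : pvSum (cur ++ [l]) = 0 := by rw [pvSum_append_singleton]; exact h
      simp [pvBlocksFrom, hs]
    · rw [if_neg h, ← pvSum_append_singleton, ih bl (cur ++ [l])]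
      have hs : pvSum (cur ++ [l]) ≠ 0 := by rw [pvSum_append_singleton]; exact h
      simp [pvBlocksFrom, hs]

-- the list of zero-crossing indices starting at running total t and index i
def pvZeros : Int → Int → List String → List Int
  | _, _, [] => []
  | t, i, l :: rest =>
    (if t + pvDelta l = 0 then [i] else []) ++ pvZeros (t + pvDelta l) (i + 1) rest

-- B's first pass computes pvZeros
lemma pvB_pass1 (rest : List String) : ∀ (i t : Int) (acc : List Int),
    ((PySem.List.enumerate rest i).foldl pvBStep1 (t, acc)).2 = acc ++ pvZeros t i rest := by
  induction rest with
  | nil => intro i t acc; simp [PySem.List.enumerate, pvZeros]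
  | cons l rest ih =>
    intro i t acc
    simp only [PySem.List.enumerate, List.foldl_cons]
    rw [show pvBStep1 (t, acc) (i, l) =
        (t + pvDelta l, if t + pvDelta l = 0 then acc ++ [i] else acc) from by
      simp [pvBStep1, pvDelta]]
    rw [ih]
    by_cases h : t + pvDelta l = 0 <;> simp [pvZeros, h]

lemma pv_take_succ {α : Type} (xs : List α) (prev j : Nat) (l : α) (rest : List α)
    (hpj : prev ≤ j) (hd : xs.drop j = l :: rest) :
    (xs.drop prev).take (j + 1 - prev) = (xs.drop prev).take (j - prev) ++ [l] := by
  have hdd : (xs.drop prev).drop (j - prev) = l :: rest := by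
    rw [List.drop_drop, show prev + (j - prev) = j by omega]; exact hd
  have hget : (xs.drop prev)[j - prev]? = some l := by
    have h1 : ((xs.drop prev).drop (j - prev))[0]? = some l := by rw [hdd]; rfl
    rw [List.getElem?_drop] at h1
    simpa using h1
  rw [show j + 1 - prev = (j - prev) + 1 by omega]
  rw [List.take_add_one, hget]
  simp

-- B's second pass, run on the zero-crossings, computes pvBlocksFrom
lemma pvB_pass2 (lineas : List String) (rest : List String) :
    ∀ (j prev : Nat) (cur bl : List String),
      prev ≤ j → lineas.drop j = rest → (lineas.drop prev).take (j - prev) = cur →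
      ((pvZeros (pvSum cur) (j : Int) rest).foldl (pvBStep2 lineas) (bl, (prev : Int))).1
        = bl ++ pvBlocksFrom cur rest := by
  induction rest with
  | nil => intro j prev cur bl _ _ _; simp [pvZeros, pvBlocksFrom]
  | cons l rest ih =>
    intro j prev cur bl hpj hdrop hcur
    have htake : (lineas.drop prev).take (j + 1 - prev) = cur ++ [l] := by
      rw [pv_take_succ lineas prev j l rest hpj hdrop, hcur]
    have hslice : PySem.List.slice lineas (some (prev : Int)) (some ((j : Int) + 1)) = cur ++ [l] := by
      rw [show ((j : Int) + 1) = ((j + 1 : Nat) : Int) by push_cast; ring]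
      rw [PySem.List.slice_natCast]
      exact htake
    have hdrop' : lineas.drop (j + 1) = rest := by
      have := congrArg (List.drop 1) hdrop
      simpa [List.drop_drop, Nat.add_comm] using this
    by_cases h : pvSum cur + pvDelta l = 0
    · have hz : pvZeros (pvSum cur) (j : Int) (l :: rest)
          = (j : Int) :: pvZeros 0 ((j : Int) + 1) rest := by
        simp [pvZeros, h]
      rw [hz]
      simp only [List.foldl_cons]
      rw [show pvBStep2 lineas (bl, (prev : Int)) (j : Int)
          = (pvEmit bl (cur ++ [l]), (j : Int) + 1) from by
        simp [pvBStep2, pvEmit, hslice]]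
      rw [show ((j : Int) + 1) = ((j + 1 : Nat) : Int) by push_cast; ring]
      rw [show (0 : Int) = pvSum [] from by simp [pvSum]]
      rw [ih (j + 1) (j + 1) [] (pvEmit bl (cur ++ [l])) le_rfl hdrop' (by simp)]
      rw [pvEmit_eq_append bl (cur ++ [l])]
      have hs : pvSum (cur ++ [l]) = 0 := by rw [pvSum_append_singleton]; exact h
      simp [pvBlocksFrom, hs]
    · have hz : pvZeros (pvSum cur) (j : Int) (l :: rest)
          = pvZeros (pvSum cur + pvDelta l) ((j : Int) + 1) rest := by
        simp [pvZeros, h]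
      rw [hz, ← pvSum_append_singleton]
      rw [show ((j : Int) + 1) = ((j + 1 : Nat) : Int) by push_cast; ring]
      rw [ih (j + 1) prev (cur ++ [l]) bl (by omega) hdrop' htake]
      have hs : pvSum (cur ++ [l]) ≠ 0 := by rw [pvSum_append_singleton]; exact h
      simp [pvBlocksFrom, hs]

-- ===== VERDICT (by name: the statement is the Claim_ definition above) =====
theorem dividir_css_en_bloques_py_spec : Claim_equal_dividir_css_en_bloques_py := by
  intro css_content _
  unfold Spec_dividir_css_en_bloques_py dividir_css_en_bloques_py dividir_css_en_bloques_py_alt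
  set lineas := (PySem.Str.split? css_content "\n").getD [] with hl
  have hA : (lineas.foldl pvAStep ([], [], 0)).1 = [] ++ pvBlocksFrom [] lineas := by
    have := pvA_fold lineas [] []
    simpa [pvSum] using this
  have hB1 : ((PySem.List.enumerate lineas).foldl pvBStep1 (0, [])).2 = pvZeros 0 0 lineas := by
    simpa using pvB_pass1 lineas 0 0 []
  have hB2 : ((pvZeros 0 0 lineas).foldl (pvBStep2 lineas) ([], 0)).1
      = [] ++ pvBlocksFrom [] lineas := by
    have := pvB_pass2 lineas lineas 0 0 [] [] le_rfl (by simp) (by simp)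
    simpa [pvSum] using this
  simp only []
  rw [hA, hB1, hB2]
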